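-- pv_equiv track=rewrite | github.com/StenAL/Advent-of-Code-2025 | src/day10.py | get_current_levels
-- ===== SOURCE A (Python) =====
-- def get_current_levels(state, target, buttons_to_levels):
--     levels = [0] * len(target)
--     for i, n in enumerate(state):
--         if n is None:
--             continue
--         to_increment = buttons_to_levels[i]
--         for j in to_increment:
--             levels[j] += n
--     return levels
-- ===== SOURCE B (Python) =====
-- def get_current_levels(state, target, buttons_to_levels):
--     # Gather: bucket each button's contribution per level, then sum the buckets.
--     contributions = [[] for _ in target]
--     for n, js in zip(state, buttons_to_levels):
--         if n is None:
--             continue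
--         for j in js:
--             contributions[j].append(n)
--     return [sum(bucket) for bucket in contributions]
-- ===== Notes on version B (the rewrite author's own statement) =====
-- stated objective: alternative
-- what changed: B gathers per-level buckets of contributions (zip over state/buttons, append into a reverse bucket list, then map-sum) instead of scattering increments into an in-place integer accumulator indexed per button.
import Mathlib
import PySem

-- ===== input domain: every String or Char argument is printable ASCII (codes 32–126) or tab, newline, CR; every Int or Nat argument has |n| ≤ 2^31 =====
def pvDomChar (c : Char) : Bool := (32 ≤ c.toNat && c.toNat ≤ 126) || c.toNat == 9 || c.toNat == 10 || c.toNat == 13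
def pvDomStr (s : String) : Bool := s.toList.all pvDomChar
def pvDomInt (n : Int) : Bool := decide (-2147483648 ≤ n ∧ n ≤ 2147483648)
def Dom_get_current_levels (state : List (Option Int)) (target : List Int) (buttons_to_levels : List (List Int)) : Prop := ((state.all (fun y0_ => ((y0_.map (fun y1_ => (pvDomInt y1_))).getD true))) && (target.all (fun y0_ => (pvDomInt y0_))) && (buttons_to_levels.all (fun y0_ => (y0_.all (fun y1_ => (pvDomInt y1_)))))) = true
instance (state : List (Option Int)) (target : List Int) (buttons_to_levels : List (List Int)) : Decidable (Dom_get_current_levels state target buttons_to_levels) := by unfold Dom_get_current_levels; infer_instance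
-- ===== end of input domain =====

-- B sums per-level buckets gathered from the buttons (reverse index) instead of A's
-- per-button in-place scatter; same cost, different decomposition ("alternative").

-- ===== PORT A =====
-- the enumerate(state) loop, with i the running index; 'levels[j] += n' is
-- pySetD/pyGetD (exact under Pre_, which demands every accessed j be in range)
def gclLoopA (btl : List (List Int)) (levels : List Int) (state : List (Option Int)) (i : Nat) : List Int :=
  match state with
  | [] => levels
  | none :: rest => gclLoopA btl levels rest (i + 1)
  | some n :: rest =>
      gclLoopA btl
        ((PySem.List.pyGetD btl (i : Int) []).foldl
          (fun lv j => PySem.List.pySetD lv j (PySem.List.pyGetD lv j 0 + n)) levels)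
        rest (i + 1)

def get_current_levels (state : List (Option Int)) (target : List Int) (buttons_to_levels : List (List Int)) : List Int :=
  gclLoopA buttons_to_levels (List.replicate target.length 0) state 0

-- ===== PORT B =====
-- sum(bucket)
def gclSum (bucket : List Int) : Int := bucket.foldl (· + ·) 0

-- the 'for n, js in zip(state, buttons_to_levels)' loop; 'contributions[j].append(n)'
-- is pySetD/pyGetD on the bucket list (exact under Pre_)
def gclLoopB (contributions : List (List Int)) (pairs : List (Option Int × List Int)) : List (List Int) :=
  match pairs with
  | [] => contributions
  | (none, _) :: rest => gclLoopB contributions rest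
  | (some n, js) :: rest =>
      gclLoopB
        (js.foldl (fun acc j => PySem.List.pySetD acc j (PySem.List.pyGetD acc j [] ++ [n])) contributions)
        rest

def get_current_levels_alt (state : List (Option Int)) (target : List Int) (buttons_to_levels : List (List Int)) : List Int :=
  (gclLoopB (List.replicate target.length []) (state.zip buttons_to_levels)).map gclSum

-- ===== PRECONDITION & SPEC =====
-- Exactly the inputs where Python A returns (no exception): every non-None button index
-- must have an entry in buttons_to_levels, and every level index it names must be a valid
-- (possibly negative) index into target's range — otherwise A raises IndexError.
def Pre_get_current_levels (state : List (Option Int)) (target : List Int) (buttons_to_levels : List (List Int)) : Prop :=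
  ∀ p ∈ state.zipIdx, p.1 ≠ none →
    p.2 < buttons_to_levels.length ∧
      ∀ j ∈ buttons_to_levels.getD p.2 [], -(target.length : Int) ≤ j ∧ j < (target.length : Int)
instance (state : List (Option Int)) (target : List Int) (buttons_to_levels : List (List Int)) : Decidable (Pre_get_current_levels state target buttons_to_levels) := by unfold Pre_get_current_levels; infer_instance

def pvWitness_get_current_levels : List (Option Int) × List Int × List (List Int) :=
  ([some 1, none, some 3], [5, 7], [[0, -2], [1], [1, 1]])

def Spec_get_current_levels (state : List (Option Int)) (target : List Int) (buttons_to_levels : List (List Int)) (out : List Int) : Prop := out = get_current_levels_alt state target buttons_to_levels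
instance (state : List (Option Int)) (target : List Int) (buttons_to_levels : List (List Int)) (out : List Int) : Decidable (Spec_get_current_levels state target buttons_to_levels out) := by unfold Spec_get_current_levels; infer_instance

-- ===== CLAIM (what is proved, stated in full; the proofs are below) =====
def Claim_equal_get_current_levels : Prop := ∀ (state : List (Option Int)) (target : List Int) (buttons_to_levels : List (List Int)), Dom_get_current_levels state target buttons_to_levels → Pre_get_current_levels state target buttons_to_levels → Spec_get_current_levels state target buttons_to_levels (get_current_levels state target buttons_to_levels)

-- ===== LEMMAS AND PROOFS =====

-- sum of a bucket with one more element
theorem gclSum_append (c : List Int) (n : Int) : gclSum (c ++ [n]) = gclSum c + n := by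
  simp [gclSum, List.foldl_append]

-- one 'levels[j] += n' on the summed buckets = one 'contributions[j].append(n)' then sum
theorem map_sum_step (inv : List (List Int)) (j n : Int) :
    (PySem.List.pySetD inv j (PySem.List.pyGetD inv j [] ++ [n])).map gclSum
      = PySem.List.pySetD (inv.map gclSum) j (PySem.List.pyGetD (inv.map gclSum) j 0 + n) := by
  simp only [PySem.List.pySetD, PySem.List.pySet?, PySem.List.pyGetD, PySem.List.pyGet?,
    List.length_map]
  cases h : PySem.List.pyIdx? inv.length j with
  | none => simp
  | some k =>
      simp only [Option.map_some, Option.bind_some, Option.getD_some, List.map_set,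
        List.getElem?_map]
      cases hk : inv[k]? with
      | none =>
          have hk' : inv.length ≤ k := by
            by_contra hlt
            exact absurd hk (by simp [List.getElem?_eq_getElem (by omega : k < inv.length)])
          simp [gclSum]
      | some c => simp [gclSum_append]

-- the inner for-loop over one button's level list, under map gclSum
theorem map_sum_foldl (js : List Int) (inv : List (List Int)) (n : Int) :
    (js.foldl (fun acc j => PySem.List.pySetD acc j (PySem.List.pyGetD acc j [] ++ [n])) inv).map gclSum
      = js.foldl (fun lv j => PySem.List.pySetD lv j (PySem.List.pyGetD lv j 0 + n)) (inv.map gclSum) := by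
  induction js generalizing inv with
  | nil => rfl
  | cons j js ih => simp only [List.foldl_cons, ih, map_sum_step]

-- main loop invariant: A's scatter from position i equals B's gather over the zipped tail,
-- provided every state entry past the end of buttons_to_levels is None
theorem loop_eq (state : List (Option Int)) (btl : List (List Int)) :
    ∀ (i : Nat) (inv : List (List Int)),
      (∀ k v, (btl.drop i).length ≤ k → state[k]? = some (some v) → False) →
      gclLoopA btl (inv.map gclSum) state i
        = (gclLoopB inv (state.zip (btl.drop i))).map gclSum := by
  induction state with
  | nil => intro i inv _; simp [gclLoopA, gclLoopB]
  | cons x rest ih =>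
      intro i inv hnone
      cases hbs : btl.drop i with
      | nil =>
          cases x with
          | none =>
              simp only [gclLoopA, List.zip_nil_right, gclLoopB]
              have hdrop : btl.drop (i + 1) = [] := by
                rw [List.drop_eq_nil_iff] at hbs ⊢; omega
              have := ih (i + 1) inv (fun k v _ hk =>
                hnone (k + 1) v (by simp [hbs]) (by simpa using hk))
              rw [hdrop] at this
              simpa [gclLoopB, List.zip_nil_right] using this
          | some n =>
              exact (hnone 0 n (by simp [hbs]) (by simp)).elim
      | cons b bs' =>
          have hget : PySem.List.pyGetD btl (i : Int) [] = b := by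
            have h0 : btl[i]? = some b := by
              have h := List.getElem?_drop (i := i) (xs := btl) (j := 0)
              rw [hbs] at h
              simpa using h.symm
            simp [PySem.List.pyGetD_natCast, List.getD, h0]
          have hdrop : btl.drop (i + 1) = bs' := by
            have h := List.drop_drop (l := btl) (i := 1) (j := i)
            simp [hbs] at h
            exact h.symm
          have hrest : ∀ k v, (btl.drop (i + 1)).length ≤ k → rest[k]? = some (some v) → False := by
            intro k v hk hkv
            exact hnone (k + 1) v (by rw [hbs]; rw [hdrop] at hk; simp; omega) (by simpa using hkv)
          cases x with
          | none =>
              simp only [gclLoopA, List.zip_cons_cons, gclLoopB]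
              rw [ih (i + 1) inv hrest, hdrop]
          | some n =>
              simp only [gclLoopA, List.zip_cons_cons, gclLoopB, hget]
              rw [← map_sum_foldl, ih (i + 1) _ hrest, hdrop]

-- ===== VERDICT (by name: the statement is the Claim_ definition above) =====
theorem get_current_levels_spec : Claim_equal_get_current_levels := by
  intro state target btl _ hpre
  unfold Spec_get_current_levels get_current_levels get_current_levels_alt
  have hnone : ∀ k v, (btl.drop 0).length ≤ k → state[k]? = some (some v) → False := by
    intro k v hk hkv
    have hmem : (some v, k) ∈ state.zipIdx := by
      rw [List.mk_mem_zipIdx_iff_getElem?]; exact hkv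
    have := (hpre _ hmem (by simp)).1
    simp at hk; omega
  have := loop_eq state btl 0 (List.replicate target.length []) hnone
  simpa [gclSum, List.map_replicate] using this
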